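-- pv_equiv track=rewrite | github.com/Reedboot/Triage-Saurus | Scripts/persist_phase2_metadata.py | collect_section
-- ===== SOURCE A (Python) =====
-- from typing import Iterable, Dict, List
--
-- def collect_section(lines: List[str], header: str) -> List[str]:
--     collected: List[str] = []
--     start_index = None
--     for idx, line in enumerate(lines):
--         if line.strip() == header:
--             start_index = idx
--             break
--     if start_index is None:
--         return collected
--
--     for line in lines[start_index + 1 :]:
--         stripped = line.strip()
--         if not stripped:
--             continue
--         if stripped.startswith("## "):
--             break
--         if stripped.startswith("### "):
--             break
--         text = None
--         if stripped.startswith("+- "):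
--             text = stripped[3:].strip()
--         elif stripped.startswith("- "):
--             text = stripped[2:].strip()
--         elif stripped.startswith("+ "):
--             text = stripped[2:].strip()
--         if text:
--             collected.append(text)
--     return collected
-- ===== SOURCE B (Python) =====
-- # B: single-pass latched state machine (SEEK/IN/DONE) over all lines; no index search, no slicing of the list
-- def collect_section(lines, header):
--     SEEK, IN, DONE = 0, 1, 2
--     state = SEEK
--     out = []
--     for line in lines:
--         s = line.strip()
--         if state == SEEK:
--             if s == header:
--                 state = IN
--         elif state == IN:
--             if s.startswith("## ") or s.startswith("### "):
--                 state = DONE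
--             elif s:
--                 for p in ("+- ", "- ", "+ "):
--                     if s.startswith(p):
--                         t = s[len(p):].strip()
--                         if t:
--                             out.append(t)
--                         break
--     return out
-- ===== Notes on version B (the rewrite author's own statement) =====
-- stated objective: alternative
-- what changed: A's find-header-index pass followed by a slice-and-scan pass is replaced by a single latched SEEK/IN/DONE state machine that visits every line exactly once with no index search and no list slicing.
import Mathlib
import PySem

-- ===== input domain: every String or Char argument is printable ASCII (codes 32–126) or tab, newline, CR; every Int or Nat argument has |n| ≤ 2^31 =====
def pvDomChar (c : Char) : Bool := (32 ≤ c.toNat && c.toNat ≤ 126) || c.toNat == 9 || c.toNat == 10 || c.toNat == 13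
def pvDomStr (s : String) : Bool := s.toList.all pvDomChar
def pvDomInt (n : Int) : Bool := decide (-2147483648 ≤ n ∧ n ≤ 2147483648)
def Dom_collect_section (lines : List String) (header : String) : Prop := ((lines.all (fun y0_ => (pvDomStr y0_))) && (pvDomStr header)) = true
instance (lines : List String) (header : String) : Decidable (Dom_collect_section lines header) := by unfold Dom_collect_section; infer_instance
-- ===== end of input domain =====

-- B replaces A's find-index-then-slice-and-scan structure by a single latched SEEK/IN/DONE
-- state-machine pass over all lines (objective: alternative decomposition; same cost).

-- ===== PORT A =====
-- first loop of A: find index of first line whose strip equals header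
def csFind : List String → String → Nat → Option Nat
  | [], _, _ => none
  | l :: ls, h, idx => if PySem.Str.strip l = h then some idx else csFind ls h (idx + 1)

-- second loop of A over lines[start+1:]
def csBody : List String → List String
  | [] => []
  | l :: ls =>
    let stripped := PySem.Str.strip l
    if stripped = "" then csBody ls
    else if PySem.Str.startswith stripped "## " then []
    else if PySem.Str.startswith stripped "### " then []
    else
      let text : Option String :=
        if PySem.Str.startswith stripped "+- " then
          some (PySem.Str.strip (PySem.Str.slice stripped (some 3) none))
        else if PySem.Str.startswith stripped "- " then
          some (PySem.Str.strip (PySem.Str.slice stripped (some 2) none))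
        else if PySem.Str.startswith stripped "+ " then
          some (PySem.Str.strip (PySem.Str.slice stripped (some 2) none))
        else none
      match text with
      | some t => if t ≠ "" then t :: csBody ls else csBody ls
      | none => csBody ls

def collect_section (lines : List String) (header : String) : List String :=
  match csFind lines header 0 with
  | none => []
  | some i => csBody (PySem.List.slice lines (some ((i : Int) + 1)) none)

-- ===== PORT B =====
-- Source B's inner prefix loop: first matching prefix wins (break), append its stripped tail if nonempty
def csItemStep : List String → String → List String → List String
  | [], _, out => out
  | p :: ps, s, out =>
    if PySem.Str.startswith s p then
      let t := PySem.Str.strip (PySem.Str.slice s (some (PySem.Str.len p)) none)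
      if t ≠ "" then out ++ [t] else out
    else csItemStep ps s out

-- Source B's loop body: one step of the SEEK(0)/IN(1)/DONE(2) machine
def csStep (header : String) : Nat × List String → String → Nat × List String
  | (state, out), line =>
    let s := PySem.Str.strip line
    if state = 0 then
      if s = header then (1, out) else (0, out)
    else if state = 1 then
      if PySem.Str.startswith s "## " || PySem.Str.startswith s "### " then (2, out)
      else if s ≠ "" then (1, csItemStep ["+- ", "- ", "+ "] s out)
      else (1, out)
    else (state, out)

def collect_section_alt (lines : List String) (header : String) : List String :=
  (lines.foldl (csStep header) (0, [])).2

-- ===== PRECONDITION & SPEC =====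
def Spec_collect_section (lines : List String) (header : String) (out : List String) : Prop := out = collect_section_alt lines header
instance (lines : List String) (header : String) (out : List String) : Decidable (Spec_collect_section lines header out) := by unfold Spec_collect_section; infer_instance

-- ===== CLAIM (what is proved, stated in full; the proofs are below) =====
def Claim_equal_collect_section : Prop := ∀ (lines : List String) (header : String), Dom_collect_section lines header → Spec_collect_section lines header (collect_section lines header)

-- ===== LEMMAS AND PROOFS =====

theorem csFind_eq (ls : List String) (h : String) (k : Nat) :
    csFind ls h k = (PySem.List.index? (ls.map PySem.Str.strip) h).map (· + k) := by
  induction ls generalizing k with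
  | nil => rfl
  | cons l ls ih =>
    by_cases hd : PySem.Str.strip l = h
    · have hL : csFind (l :: ls) h k = some k := by simp only [csFind, if_pos hd]
      rw [hL, List.map_cons, hd, PySem.List.index?_cons_self]
      simp
    · have hL : csFind (l :: ls) h k = csFind ls h (k + 1) := by
        simp only [csFind, if_neg hd]
      rw [hL, List.map_cons, PySem.List.index?_cons_of_ne _ hd, ih (k + 1)]
      cases PySem.List.index? (ls.map PySem.Str.strip) h with
      | none => simp
      | some j => simp; omega

-- A unfolded one line at a time
theorem collect_section_cons (l : String) (ls : List String) (h : String) :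
    collect_section (l :: ls) h =
      if PySem.Str.strip l = h then csBody ls else collect_section ls h := by
  by_cases hd : PySem.Str.strip l = h
  · have : csFind (l :: ls) h 0 = some 0 := by simp only [csFind, if_pos hd]
    simp only [collect_section, this, if_pos hd]
    norm_num
    rw [show ((1 : Int) = ((1 : Nat) : Int)) from rfl, PySem.List.slice_from_natCast]
    rfl
  · have h1 : csFind (l :: ls) h 0 = csFind ls h 1 := by simp only [csFind, if_neg hd]
    simp only [collect_section, h1, if_neg hd, csFind_eq]
    cases hix : PySem.List.index? (ls.map PySem.Str.strip) h with
    | none => rfl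
    | some i =>
      simp only [Option.map_some, Nat.add_zero]
      have c1 : ((i + 1 : Nat) : Int) + 1 = ((i + 2 : Nat) : Int) := by push_cast; ring
      have c2 : ((i : Nat) : Int) + 1 = ((i + 1 : Nat) : Int) := by push_cast; ring
      rw [c1, c2, PySem.List.slice_from_natCast, PySem.List.slice_from_natCast]
      rfl

theorem csStep_done (h : String) (ls : List String) (out : List String) :
    ls.foldl (csStep h) (2, out) = (2, out) := by
  induction ls with
  | nil => rfl
  | cons l ls ih => simpa [csStep] using ih

theorem csStep_in_eq (h line : String) (out : List String) :
    csStep h (1, out) line =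
      (if PySem.Str.startswith (PySem.Str.strip line) "## " = true ∨
          PySem.Str.startswith (PySem.Str.strip line) "### " = true then (2, out)
       else if PySem.Str.strip line ≠ "" then
         (1, csItemStep ["+- ", "- ", "+ "] (PySem.Str.strip line) out)
       else (1, out)) := by
  simp [csStep]

theorem csStep_in (h : String) (ls : List String) (out : List String) :
    (ls.foldl (csStep h) (1, out)).2 = out ++ csBody ls := by
  induction ls generalizing out with
  | nil => simp [csBody]
  | cons l ls ih =>
    rw [List.foldl_cons]
    by_cases h1 : PySem.Str.startswith (PySem.Str.strip l) "## " = true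
    · have h0 : PySem.Str.strip l ≠ "" := by
        intro he; rw [he] at h1; exact absurd h1 (by decide)
      have hs : csStep h (1, out) l = (2, out) := by
        rw [csStep_in_eq]; exact if_pos (Or.inl h1)
      have hb : csBody (l :: ls) = [] := by
        simp only [csBody, if_neg h0, h1, if_true]
      rw [hs, csStep_done, hb]; simp
    · by_cases h2 : PySem.Str.startswith (PySem.Str.strip l) "### " = true
      · have h0 : PySem.Str.strip l ≠ "" := by
          intro he; rw [he] at h2; exact absurd h2 (by decide)
        have hs : csStep h (1, out) l = (2, out) := by
          rw [csStep_in_eq]; exact if_pos (Or.inr h2)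
        have hb : csBody (l :: ls) = [] := by
          simp only [csBody, if_neg h0, h1, h2, Bool.false_eq_true, if_false, if_true]
        rw [hs, csStep_done, hb]; simp
      · by_cases h0 : PySem.Str.strip l = ""
        · have hs : csStep h (1, out) l = (1, out) := by
            rw [csStep_in_eq, if_neg (fun hc => hc.elim h1 h2), if_neg (not_not_intro h0)]
          have hb : csBody (l :: ls) = csBody ls := by
            simp only [csBody, if_pos h0]
          rw [hs, ih, hb]
        · have hs : csStep h (1, out) l =
              (1, csItemStep ["+- ", "- ", "+ "] (PySem.Str.strip l) out) := by
            rw [csStep_in_eq, if_neg (fun hc => hc.elim h1 h2), if_pos h0]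
          rw [hs, ih]
          have hB : csBody (l :: ls) =
              (match
                (if PySem.Str.startswith (PySem.Str.strip l) "+- " = true then
                  some (PySem.Str.strip (PySem.Str.slice (PySem.Str.strip l) (some 3) none))
                else if PySem.Str.startswith (PySem.Str.strip l) "- " = true then
                  some (PySem.Str.strip (PySem.Str.slice (PySem.Str.strip l) (some 2) none))
                else if PySem.Str.startswith (PySem.Str.strip l) "+ " = true then
                  some (PySem.Str.strip (PySem.Str.slice (PySem.Str.strip l) (some 2) none))
                else none) with
               | some t => if t ≠ "" then t :: csBody ls else csBody ls
               | none => csBody ls) := by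
            simp only [csBody, if_neg h0, h1, h2, Bool.false_eq_true, if_false]
          rw [hB]
          by_cases p1 : PySem.Str.startswith (PySem.Str.strip l) "+- " = true
          · have hi : csItemStep ["+- ", "- ", "+ "] (PySem.Str.strip l) out =
                (if PySem.Str.strip (PySem.Str.slice (PySem.Str.strip l) (some 3) none) ≠ "" then
                  out ++ [PySem.Str.strip (PySem.Str.slice (PySem.Str.strip l) (some 3) none)]
                 else out) := by
              simp only [csItemStep, p1, if_true]
              rw [show PySem.Str.len "+- " = (3 : Int) from by decide]
            rw [hi, if_pos p1]
            by_cases t0 : PySem.Str.strip (PySem.Str.slice (PySem.Str.strip l) (some 3) none) = ""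
            · simp [t0]
            · simp [t0]
          · rw [if_neg p1]
            by_cases p2 : PySem.Str.startswith (PySem.Str.strip l) "- " = true
            · have hi : csItemStep ["+- ", "- ", "+ "] (PySem.Str.strip l) out =
                  (if PySem.Str.strip (PySem.Str.slice (PySem.Str.strip l) (some 2) none) ≠ "" then
                    out ++ [PySem.Str.strip (PySem.Str.slice (PySem.Str.strip l) (some 2) none)]
                   else out) := by
                simp only [csItemStep, p1, p2, Bool.false_eq_true, if_false, if_true]
                rw [show PySem.Str.len "- " = (2 : Int) from by decide]
              rw [hi, if_pos p2]
              by_cases t0 : PySem.Str.strip (PySem.Str.slice (PySem.Str.strip l) (some 2) none) = ""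
              · simp [t0]
              · simp [t0]
            · rw [if_neg p2]
              by_cases p3 : PySem.Str.startswith (PySem.Str.strip l) "+ " = true
              · have hi : csItemStep ["+- ", "- ", "+ "] (PySem.Str.strip l) out =
                    (if PySem.Str.strip (PySem.Str.slice (PySem.Str.strip l) (some 2) none) ≠ "" then
                      out ++ [PySem.Str.strip (PySem.Str.slice (PySem.Str.strip l) (some 2) none)]
                     else out) := by
                  simp only [csItemStep, p1, p2, p3, Bool.false_eq_true, if_false, if_true]
                  rw [show PySem.Str.len "+ " = (2 : Int) from by decide]
                rw [hi, if_pos p3]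
                by_cases t0 : PySem.Str.strip (PySem.Str.slice (PySem.Str.strip l) (some 2) none) = ""
                · simp [t0]
                · simp [t0]
              · have hi : csItemStep ["+- ", "- ", "+ "] (PySem.Str.strip l) out = out := by
                  simp only [csItemStep, p1, p2, p3, Bool.false_eq_true, if_false]
                rw [hi, if_neg p3]

theorem csStep_seek (h : String) (ls : List String) (out : List String) :
    (ls.foldl (csStep h) (0, out)).2 = out ++ collect_section ls h := by
  induction ls generalizing out with
  | nil => simp [collect_section, csFind]
  | cons l ls ih =>
    rw [collect_section_cons]
    by_cases hd : PySem.Str.strip l = h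
    · have : csStep h (0, out) l = (1, out) := by simp [csStep, hd]
      rw [List.foldl_cons, this, csStep_in]
      simp [hd]
    · have : csStep h (0, out) l = (0, out) := by simp [csStep, hd]
      rw [List.foldl_cons, this, ih]
      simp [hd]

-- ===== VERDICT (by name: the statement is the Claim_ definition above) =====
theorem collect_section_spec : Claim_equal_collect_section := by
  intro lines header _
  unfold Spec_collect_section collect_section_alt
  rw [csStep_seek]
  simp
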